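-- pv_equiv track=rewrite | github.com/cash2one/sport-news-writer | writer/game/models.py | list_authors
-- ===== SOURCE A (Python) =====
-- def list_authors(authors):
--     ret = ''
--     for i, author in enumerate(authors):
--         goals = 'min. '
--         goals += ', '.join(authors[author])
--         if (i != 0) and (i != len(authors) - 1):
--             ret += ', '
--         if (i != len(authors) - 1) or (len(authors) == 1):
--             ret += '%s (%s)' % (author, goals)
--         else:
--             ret += u' şi %s (%s) ' % (author, goals)
--     return ret
-- ===== SOURCE B (Python) =====
-- def list_authors(authors):
--     parts = ['%s (min. %s)' % (author, ', '.join(goals))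
--              for author, goals in authors.items()]
--     if not parts:
--         return ''
--     if len(parts) == 1:
--         return parts[0]
--     return ', '.join(parts[:-1]) + ' şi ' + parts[-1] + ' '
-- ===== Notes on version B (the rewrite author's own statement) =====
-- stated objective: simpler
-- what changed: Replaces A's per-iteration positional branching (each index compared with 0 and len-1 inside the loop, plus a dict lookup per key) with building the list of formatted parts once from items() and assembling the sentence as ', '.join(parts[:-1]) + ' şi ' + parts[-1] + ' ', with early returns when there are fewer than two parts.
import Mathlib
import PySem

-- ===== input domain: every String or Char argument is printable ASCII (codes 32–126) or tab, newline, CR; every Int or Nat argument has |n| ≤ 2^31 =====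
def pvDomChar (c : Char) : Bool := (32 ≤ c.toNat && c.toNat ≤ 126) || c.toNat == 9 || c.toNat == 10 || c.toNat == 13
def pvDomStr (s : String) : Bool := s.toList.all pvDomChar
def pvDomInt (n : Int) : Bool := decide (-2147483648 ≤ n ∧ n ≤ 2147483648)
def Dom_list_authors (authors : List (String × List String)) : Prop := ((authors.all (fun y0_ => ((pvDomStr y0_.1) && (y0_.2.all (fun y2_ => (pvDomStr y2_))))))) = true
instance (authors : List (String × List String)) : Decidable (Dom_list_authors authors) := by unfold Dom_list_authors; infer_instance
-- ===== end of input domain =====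

-- B builds the formatted part of every author once and assembles
-- ', '.join(parts[:-1]) + ' şi ' + parts[-1] + ' ' instead of A's per-index branching (objective: simpler).
-- The dict parameter arrives as an association list and is materialized with PySem.Dict.ofList in both ports.

-- ===== PORT A =====
-- the loop body of A, kept as a helper (ret is the accumulator, ip = (i, (author, goals-list)))
def pvBodyA (d : PySem.Dict String (List String)) (ret : String)
    (ip : Int × (String × List String)) : String :=
  let goals := "min. " ++ PySem.Str.join ", " (d.getD ip.2.1 [])
  let ret := if ip.1 ≠ 0 ∧ ip.1 ≠ PySem.List.len d.items - 1 then ret ++ ", " else ret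
  if ip.1 ≠ PySem.List.len d.items - 1 ∨ PySem.List.len d.items = 1 then
    ret ++ ip.2.1 ++ " (" ++ goals ++ ")"
  else
    ret ++ " şi " ++ ip.2.1 ++ " (" ++ goals ++ ") "

def list_authors (authors : List (String × List String)) : String :=
  let d := PySem.Dict.ofList authors
  (PySem.List.enumerate d.items 0).foldl (pvBodyA d) ""

-- ===== PORT B =====
-- '%s (min. %s)' % (author, ', '.join(goals))
def pvPartB (p : String × List String) : String :=
  p.1 ++ " (min. " ++ PySem.Str.join ", " p.2 ++ ")"

def list_authors_alt (authors : List (String × List String)) : String :=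
  let parts := (PySem.Dict.ofList authors).items.map pvPartB
  match parts with
  | [] => ""
  | [p] => p
  | _ :: _ :: _ =>
      PySem.Str.join ", " (PySem.List.slice parts none (some (-1))) ++ " şi " ++
        PySem.List.pyGetD parts (-1) "" ++ " "

-- ===== PRECONDITION & SPEC =====
def Spec_list_authors (authors : List (String × List String)) (out : String) : Prop := out = list_authors_alt authors
instance (authors : List (String × List String)) (out : String) : Decidable (Spec_list_authors authors out) := by unfold Spec_list_authors; infer_instance

-- ===== CLAIM (what is proved, stated in full; the proofs are below) =====
def Claim_equal_list_authors : Prop := ∀ (authors : List (String × List String)), Dom_list_authors authors → Spec_list_authors authors (list_authors authors)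

-- ===== LEMMAS AND PROOFS =====

-- the characters contributed by one author, and by the tail of the author list (positions ≥ 1)
def pvPart (p : String × List String) : List Char :=
  p.1.toList ++ " (".toList ++ "min. ".toList ++ (PySem.Str.join ", " p.2).toList ++ ")".toList

def pvTail : List (String × List String) → List Char
  | [] => []
  | [p] => " şi ".toList ++ pvPart p ++ " ".toList
  | p :: q :: r => ", ".toList ++ pvPart p ++ pvTail (q :: r)

def pvSpec : List (String × List String) → List Char
  | [] => []
  | [p] => pvPart p
  | p :: q :: r => pvPart p ++ pvTail (q :: r)

-- ', '.join at the character level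
def pvLj (l : List String) : List Char :=
  PySem.Chars.join ", ".toList (l.map String.toList)

theorem pvLj_eq (l : List String) : (PySem.Str.join ", " l).toList = pvLj l := by
  simp [pvLj, PySem.Str.toList_join]

theorem pvLj_cons_cons (a b : String) (t : List String) :
    pvLj (a :: b :: t) = a.toList ++ ", ".toList ++ pvLj (b :: t) := by
  simp [pvLj, PySem.Chars.join_cons_cons]

theorem pvPartB_toList (p : String × List String) : (pvPartB p).toList = pvPart p := by
  simp [pvPartB, pvPart, String.toList_append]

theorem pvA_tail (d : PySem.Dict String (List String)) (s : List (String × List String))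
    (k : Nat) (ret : String) (hk : 1 ≤ k) (hlen : k + s.length = d.items.length)
    (hget : ∀ p ∈ s, d.getD p.1 [] = p.2) (hs : s ≠ []) :
    ((PySem.List.enumerate s (k : Int)).foldl (pvBodyA d) ret).toList
      = ret.toList ++ pvTail s := by
  induction s generalizing k ret with
  | nil => exact absurd rfl hs
  | cons p rest ih =>
    have hg := hget p (by simp)
    cases rest with
    | nil =>
        have hL : k + 1 = d.items.length := by simpa using hlen
        have h1 : ¬ ((k : Int) ≠ 0 ∧ (k : Int) ≠ (d.items.length : Int) - 1) := by omega
        have h2 : ¬ ((k : Int) ≠ (d.items.length : Int) - 1 ∨ (d.items.length : Int) = 1) := by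
          omega
        simp only [PySem.List.enumerate_cons, PySem.List.enumerate_nil, List.foldl_cons,
          List.foldl_nil, pvBodyA, PySem.List.len_eq, if_neg h1, if_neg h2, hg]
        simp [pvTail, pvPart, String.toList_append]
    | cons q r =>
        have hL : k + (r.length + 2) = d.items.length := by simpa using hlen
        have h1 : ((k : Int) ≠ 0 ∧ (k : Int) ≠ (d.items.length : Int) - 1) := by
          constructor <;> omega
        have h2 : ((k : Int) ≠ (d.items.length : Int) - 1 ∨ (d.items.length : Int) = 1) := by
          left; omega
        have hrec := ih (k + 1)
          (ret ++ ", " ++ p.1 ++ " (" ++ ("min. " ++ PySem.Str.join ", " (d.getD p.1 [])) ++ ")")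
          (by omega) (by simp; omega) (fun x hx => hget x (by simp [hx])) (by simp)
        rw [PySem.List.enumerate_cons, List.foldl_cons]
        rw [show pvBodyA d ret ((k : Int), p)
              = ret ++ ", " ++ p.1 ++ " (" ++ ("min. " ++ PySem.Str.join ", " (d.getD p.1 [])) ++ ")" from by
          simp only [pvBodyA, PySem.List.len_eq, if_pos h1, if_pos h2]]
        rw [show ((k : Int) + 1) = ((k + 1 : Nat) : Int) from by push_cast; ring]
        rw [hrec]
        simp [pvTail, pvPart, String.toList_append, hg, List.append_assoc]

theorem pvA_eq (authors : List (String × List String)) :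
    (list_authors authors).toList = pvSpec (PySem.Dict.ofList authors).items := by
  have hnd := PySem.Dict.nodup_keys_ofList authors
  have hget : ∀ p ∈ (PySem.Dict.ofList authors).items,
      (PySem.Dict.ofList authors).getD p.1 [] = p.2 := by
    intro p hp
    exact PySem.Dict.getD_of_mem_items _ (by simpa using hp) hnd []
  set d := PySem.Dict.ofList authors with hd
  rw [show list_authors authors = (PySem.List.enumerate d.items 0).foldl (pvBodyA d) "" from rfl]
  rcases hit : d.items with _ | ⟨p, rest⟩
  · simp [PySem.List.enumerate_nil, pvSpec]
  · have hg := hget p (by simp [hit])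
    cases rest with
    | nil =>
        have hL : d.items.length = 1 := by rw [hit]; rfl
        have h1 : ¬ ((0 : Int) ≠ 0 ∧ (0 : Int) ≠ (d.items.length : Int) - 1) := by simp
        have h2 : ((0 : Int) ≠ (d.items.length : Int) - 1 ∨ (d.items.length : Int) = 1) := by
          right; omega
        simp only [PySem.List.enumerate_cons, PySem.List.enumerate_nil, List.foldl_cons,
          List.foldl_nil, pvBodyA, PySem.List.len_eq, if_neg h1, if_pos h2, hg]
        simp [pvSpec, pvPart, String.toList_append]
    | cons q r =>
        have hL : d.items.length = r.length + 2 := by rw [hit]; simp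
        have h1 : ¬ ((0 : Int) ≠ 0 ∧ (0 : Int) ≠ (d.items.length : Int) - 1) := by simp
        have h2 : ((0 : Int) ≠ (d.items.length : Int) - 1 ∨ (d.items.length : Int) = 1) := by
          left; omega
        rw [PySem.List.enumerate_cons, List.foldl_cons]
        rw [show pvBodyA d "" ((0 : Int), p)
              = "" ++ p.1 ++ " (" ++ ("min. " ++ PySem.Str.join ", " (d.getD p.1 [])) ++ ")" from by
          simp only [pvBodyA, PySem.List.len_eq, if_neg h1, if_pos h2]]
        rw [show ((0 : Int) + 1) = ((1 : Nat) : Int) from by norm_num]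
        rw [pvA_tail d (q :: r) 1 _ (le_refl 1) (by simp; omega)
          (fun x hx => hget x (by simp [hit, hx])) (by simp)]
        simp [pvSpec, pvPart, String.toList_append, hg, List.append_assoc]

theorem pvB_big (r : List (String × List String)) :
    ∀ (p q : String × List String),
    pvLj (((p :: q :: r).map pvPartB).dropLast) ++ " şi ".toList ++
      (((p :: q :: r).map pvPartB).getLast (by simp)).toList ++ " ".toList
      = pvPart p ++ pvTail (q :: r) := by
  induction r with
  | nil =>
      intro p q
      simp [pvLj, PySem.Chars.join_singleton, List.getLast, pvPartB_toList, pvTail,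
        List.append_assoc]
  | cons r0 r' ih =>
      intro p q
      have h := ih q r0
      rw [show ((p :: q :: r0 :: r').map pvPartB).dropLast
            = pvPartB p :: ((q :: r0 :: r').map pvPartB).dropLast from by simp]
      rw [show ((p :: q :: r0 :: r').map pvPartB).getLast (by simp)
            = ((q :: r0 :: r').map pvPartB).getLast (by simp) from by
          simp [List.getLast_cons]]
      rcases hdl : ((q :: r0 :: r').map pvPartB).dropLast with _ | ⟨b, t⟩
      · simp at hdl
      · rw [hdl] at h
        rw [pvLj_cons_cons]
        simp only [List.append_assoc] at h ⊢
        rw [h]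
        simp [pvPartB_toList, pvTail]

theorem pvB_eq (authors : List (String × List String)) :
    (list_authors_alt authors).toList = pvSpec (PySem.Dict.ofList authors).items := by
  unfold list_authors_alt
  rcases hit : (PySem.Dict.ofList authors).items with _ | ⟨p, rest⟩
  · simp [pvSpec]
  · cases rest with
    | nil => simp [pvSpec, pvPartB_toList]
    | cons q r =>
        have h := pvB_big r p q
        simp only [List.map_cons]
        rw [show (pvPartB p :: pvPartB q :: r.map pvPartB) = (p :: q :: r).map pvPartB from by
          simp]
        rw [PySem.List.slice_to_neg_one]
        rw [PySem.List.pyGetD_neg_one ((p :: q :: r).map pvPartB) "" (by simp)]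
        simp only [String.toList_append, pvLj_eq, List.append_assoc] at h ⊢
        rw [show pvSpec (p :: q :: r) = pvPart p ++ pvTail (q :: r) from rfl]
        simpa using h

-- ===== VERDICT (by name: the statement is the Claim_ definition above) =====
theorem list_authors_spec : Claim_equal_list_authors := by
  intro authors _
  unfold Spec_list_authors
  apply String.toList_inj.mp
  rw [pvA_eq, pvB_eq]
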